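-- pv_equiv track=rewrite | github.com/kimdogyu1/practice-algorithm | isbn.py | ISBN
-- ===== SOURCE A (Python) =====
-- def ISBN(isbn):
--
--     s = 0
--     result = False
--
--     if len(isbn) != 13:
--         return False
--
--
--     for i in range(len(isbn)):
--             num = int(isbn[i])
--             if i % 2 !=0:
--                 s += num * 3
--             else:
--                 s += num * 1
--     result = s % 10 == 0
--
--     return result
-- ===== SOURCE B (Python) =====
-- def ISBN(isbn):
--     if len(isbn) != 13:
--         return False
--     even = sum(int(c) for c in isbn[0::2])
--     odd = sum(int(c) for c in isbn[1::2])
--     return (even + 3 * odd) % 10 == 0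
-- ===== Notes on version B (the rewrite author's own statement) =====
-- stated objective: simpler
-- what changed: Replaces the single indexed loop with a per-index parity branch by two branch-free slice sums (isbn[0::2] and isbn[1::2]) combined as even + 3*odd.
import Mathlib
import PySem

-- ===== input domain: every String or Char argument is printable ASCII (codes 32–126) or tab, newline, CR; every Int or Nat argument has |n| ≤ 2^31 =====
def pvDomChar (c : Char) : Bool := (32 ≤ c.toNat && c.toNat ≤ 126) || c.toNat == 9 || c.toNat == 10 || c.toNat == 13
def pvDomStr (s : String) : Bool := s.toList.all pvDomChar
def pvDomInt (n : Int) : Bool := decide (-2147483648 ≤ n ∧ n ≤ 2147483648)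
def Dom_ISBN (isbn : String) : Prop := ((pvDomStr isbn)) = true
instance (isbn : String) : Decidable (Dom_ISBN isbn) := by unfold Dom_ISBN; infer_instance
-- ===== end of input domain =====

-- B replaces A's indexed loop with a parity branch by two branch-free slice sums (even + 3*odd); equal return values on Pre_.

-- ===== PORT A =====
-- int(isbn[i]): none = ValueError; the loop threads an Option accumulator, none once int raises.
def ISBN (isbn : String) : Bool :=
  let cs := isbn.toList
  if cs.length ≠ 13 then false
  else
    let s : Option Int := (List.range cs.length).foldl
      (fun acc i =>
        acc.bind fun s =>
          ((PySem.List.pyGet? cs (i : Int)).bind fun c => PySem.Int.ofChars? [c]).map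
            fun num => if i % 2 ≠ 0 then s + num * 3 else s + num * 1)
      (some 0)
    match s with
    | some v => PySem.Int.mod v 10 == 0
    | none => false

-- ===== PORT B =====
-- sum(int(c) for c in cs); none once int raises
def pvSumInts (cs : List Char) : Option Int :=
  cs.foldl (fun acc c => acc.bind fun s => (PySem.Int.ofChars? [c]).map fun n => s + n) (some 0)

def ISBN_alt (isbn : String) : Bool :=
  let cs := isbn.toList
  if cs.length ≠ 13 then false
  else
    match (PySem.List.slice? cs (some 0) none 2).bind pvSumInts,
          (PySem.List.slice? cs (some 1) none 2).bind pvSumInts with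
    | some even, some odd => PySem.Int.mod (even + 3 * odd) 10 == 0
    | _, _ => false

-- ===== PRECONDITION & SPEC =====
-- Pre_ excludes length-13 strings containing a non-digit character: there int() raises ValueError in A (and in B).
def Pre_ISBN (isbn : String) : Prop :=
  isbn.toList.length = 13 → isbn.toList.all PySem.Chars.isdigit = true
instance (isbn : String) : Decidable (Pre_ISBN isbn) := by unfold Pre_ISBN; infer_instance
def pvWitness_ISBN : String := "9780306406157"

def Spec_ISBN (isbn : String) (out : Bool) : Prop := out = ISBN_alt isbn
instance (isbn : String) (out : Bool) : Decidable (Spec_ISBN isbn out) := by unfold Spec_ISBN; infer_instance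

-- ===== CLAIM (what is proved, stated in full; the proofs are below) =====
def Claim_equal_ISBN : Prop := ∀ (isbn : String), Dom_ISBN isbn → Pre_ISBN isbn → Spec_ISBN isbn (ISBN isbn)

-- ===== LEMMAS AND PROOFS =====

theorem sliceE {α : Type} (a b c d e f g h i j k l m : α) :
    PySem.List.slice? [a,b,c,d,e,f,g,h,i,j,k,l,m] (some 0) none 2 = some [a,c,e,g,i,k,m] := by
  simp [PySem.List.slice?, PySem.List.sliceIndices, List.range_succ]

theorem sliceO {α : Type} (a b c d e f g h i j k l m : α) :
    PySem.List.slice? [a,b,c,d,e,f,g,h,i,j,k,l,m] (some 1) none 2 = some [b,d,f,h,j,l] := by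
  simp [PySem.List.slice?, PySem.List.sliceIndices, List.range_succ]

theorem digit_cases (c : Char) (h : PySem.Chars.isdigit c = true) :
    c = '0' ∨ c = '1' ∨ c = '2' ∨ c = '3' ∨ c = '4' ∨ c = '5' ∨ c = '6' ∨ c = '7' ∨ c = '8' ∨ c = '9' := by
  simp only [PySem.Chars.isdigit, Bool.and_eq_true, decide_eq_true_eq] at h
  obtain ⟨h1, h2⟩ := h
  rw [Char.le_def, UInt32.le_iff_toNat_le] at h1 h2
  rw [show ('0').val.toNat = 48 from rfl] at h1
  rw [show ('9').val.toNat = 57 from rfl] at h2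
  have hcv : c.toNat = c.val.toNat := rfl
  have hb : c.toNat = 48 ∨ c.toNat = 49 ∨ c.toNat = 50 ∨ c.toNat = 51 ∨ c.toNat = 52 ∨
      c.toNat = 53 ∨ c.toNat = 54 ∨ c.toNat = 55 ∨ c.toNat = 56 ∨ c.toNat = 57 := by
    omega
  have heq : ∀ (d : Char), c.toNat = d.toNat → c = d := by
    intro d hd; exact Char.ext (UInt32.toNat_inj.mp hd)
  rcases hb with h|h|h|h|h|h|h|h|h|h
  · exact Or.inl (heq '0' h)
  · exact Or.inr (Or.inl (heq '1' h))
  · exact Or.inr (Or.inr (Or.inl (heq '2' h)))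
  · exact Or.inr (Or.inr (Or.inr (Or.inl (heq '3' h))))
  · exact Or.inr (Or.inr (Or.inr (Or.inr (Or.inl (heq '4' h)))))
  · exact Or.inr (Or.inr (Or.inr (Or.inr (Or.inr (Or.inl (heq '5' h))))))
  · exact Or.inr (Or.inr (Or.inr (Or.inr (Or.inr (Or.inr (Or.inl (heq '6' h)))))))
  · exact Or.inr (Or.inr (Or.inr (Or.inr (Or.inr (Or.inr (Or.inr (Or.inl (heq '7' h))))))))
  · exact Or.inr (Or.inr (Or.inr (Or.inr (Or.inr (Or.inr (Or.inr (Or.inr (Or.inl (heq '8' h)))))))))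
  · exact Or.inr (Or.inr (Or.inr (Or.inr (Or.inr (Or.inr (Or.inr (Or.inr (Or.inr (heq '9' h)))))))))

theorem ofChars?_digit (c : Char) (h : PySem.Chars.isdigit c = true) :
    PySem.Int.ofChars? [c] = some ((c.toNat : Int) - 48) := by
  rcases digit_cases c h with h|h|h|h|h|h|h|h|h|h <;> subst h <;> decide

-- ===== VERDICT (by name: the statement is the Claim_ definition above) =====
theorem ISBN_spec : Claim_equal_ISBN := by
  intro isbn _ hpre
  unfold Spec_ISBN ISBN ISBN_alt
  by_cases hlen : isbn.toList.length = 13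
  · have hall := hpre hlen
    obtain ⟨c0,c1,c2,c3,c4,c5,c6,c7,c8,c9,c10,c11,c12,hcs⟩ :
        ∃ a b c d e f g h i j k l m, isbn.toList = [a,b,c,d,e,f,g,h,i,j,k,l,m] := by
      match hx : isbn.toList, hlen with
      | [a,b,c,d,e,f,g,h,i,j,k,l,m], _ => exact ⟨a,b,c,d,e,f,g,h,i,j,k,l,m, rfl⟩
    rw [hcs] at hall ⊢
    simp only [List.all_cons, List.all_nil, Bool.and_eq_true, Bool.and_true] at hall
    obtain ⟨d0,d1,d2,d3,d4,d5,d6,d7,d8,d9,d10,d11,d12⟩ := hall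
    simp [PySem.List.pyGet?, PySem.List.pyIdx?, sliceE, sliceO, pvSumInts,
      List.range_succ, PySem.Int.mod, Option.bind, Option.map,
      ofChars?_digit _ d0, ofChars?_digit _ d1, ofChars?_digit _ d2, ofChars?_digit _ d3,
      ofChars?_digit _ d4, ofChars?_digit _ d5, ofChars?_digit _ d6, ofChars?_digit _ d7,
      ofChars?_digit _ d8, ofChars?_digit _ d9, ofChars?_digit _ d10, ofChars?_digit _ d11,
      ofChars?_digit _ d12]
    ring
  · have hl : isbn.length ≠ 13 := by rwa [← String.length_toList]
    simp [hl]
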